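-- pv_equiv track=rewrite | github.com/webitnet/100x-screener | backend/app/modules/analysis/holder_analyzer.py | _get_contract
-- ===== SOURCE A (Python) =====
-- CHAIN_IDS = {
--     "ethereum": "1",
--     "binance-smart-chain": "56",
--     "arbitrum-one": "42161",
--     "base": "8453",
-- }
--
-- def _get_contract(detail: dict) -> dict | None:
--     platforms = detail.get("platforms", {})
--     for platform, address in platforms.items():
--         if address and platform in CHAIN_IDS:
--             return {"address": address, "chain_id": CHAIN_IDS[platform]}
--     for platform, address in platforms.items():
--         if address:
--             return {"address": address, "chain_id": "1"}
--     return None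
-- ===== SOURCE B (Python) =====
-- CHAIN_IDS = {
--     "ethereum": "1",
--     "binance-smart-chain": "56",
--     "arbitrum-one": "42161",
--     "base": "8453",
-- }
--
-- def _get_contract(detail: dict) -> dict | None:
--     first_known = None
--     first_any = None
--     for platform, address in detail.get("platforms", {}).items():
--         if address:
--             if first_known is None and platform in CHAIN_IDS:
--                 first_known = {"address": address, "chain_id": CHAIN_IDS[platform]}
--             if first_any is None:
--                 first_any = address
--     if first_known is not None:
--         return first_known
--     if first_any is not None:
--         return {"address": first_any, "chain_id": "1"}
--     return None
-- ===== Notes on version B (the rewrite author's own statement) =====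
-- stated objective: simpler
-- what changed: Replaced A's two sequential scans of platforms.items() with a single pass maintaining two accumulators (first known-platform contract and first truthy address), combined after the loop.
import Mathlib
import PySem

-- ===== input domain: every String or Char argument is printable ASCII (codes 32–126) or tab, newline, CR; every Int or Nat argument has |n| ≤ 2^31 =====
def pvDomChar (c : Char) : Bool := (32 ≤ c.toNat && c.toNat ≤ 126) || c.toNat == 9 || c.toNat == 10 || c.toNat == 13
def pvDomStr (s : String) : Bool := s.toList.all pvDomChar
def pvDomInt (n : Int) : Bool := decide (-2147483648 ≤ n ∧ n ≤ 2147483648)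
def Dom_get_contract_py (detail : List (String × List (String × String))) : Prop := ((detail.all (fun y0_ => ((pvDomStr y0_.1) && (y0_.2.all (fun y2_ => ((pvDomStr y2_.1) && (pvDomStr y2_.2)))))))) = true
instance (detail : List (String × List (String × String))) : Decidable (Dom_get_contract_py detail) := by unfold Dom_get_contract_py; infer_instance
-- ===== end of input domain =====

-- B collapses A's two sequential scans into one pass with two accumulators (simpler decomposition, same O(n) cost).


-- ===== PORT A =====
def chainIds : PySem.Dict String String := PySem.Dict.ofList
  [("ethereum", "1"), ("binance-smart-chain", "56"), ("arbitrum-one", "42161"), ("base", "8453")]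

-- first loop of A: first truthy address whose platform is a CHAIN_IDS key
def aLoop1 : List (String × String) → Option (List (String × String))
  | [] => none
  | (platform, address) :: rest =>
    if address ≠ "" then
      match PySem.Dict.get? chainIds platform with
      | some cid => some [("address", address), ("chain_id", cid)]
      | none => aLoop1 rest
    else aLoop1 rest

-- second loop of A: first truthy address, chain_id defaults to "1"
def aLoop2 : List (String × String) → Option (List (String × String))
  | [] => none
  | (_, address) :: rest =>
    if address ≠ "" then some [("address", address), ("chain_id", "1")]
    else aLoop2 rest

def get_contract_py (detail : List (String × List (String × String))) : Option (List (String × String)) :=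
  let platforms := PySem.Dict.getD (PySem.Dict.mk detail) "platforms" []
  match aLoop1 platforms with
  | some r => some r
  | none => aLoop2 platforms

-- ===== PORT B =====
-- one step of B's single loop over (first_known, first_any)
def bStep (acc : Option (List (String × String)) × Option String) (pa : String × String) :
    Option (List (String × String)) × Option String :=
  if pa.2 ≠ "" then
    ((if acc.1.isNone then
        match PySem.Dict.get? chainIds pa.1 with
        | some cid => some [("address", pa.2), ("chain_id", cid)]
        | none => acc.1
      else acc.1),
     (if acc.2.isNone then some pa.2 else acc.2))
  else acc

def get_contract_py_alt (detail : List (String × List (String × String))) : Option (List (String × String)) :=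
  let platforms := PySem.Dict.getD (PySem.Dict.mk detail) "platforms" []
  let st := platforms.foldl bStep (none, none)
  match st.1, st.2 with
  | some r, _ => some r
  | none, some a => some [("address", a), ("chain_id", "1")]
  | none, none => none

-- ===== PRECONDITION & SPEC =====
def Spec_get_contract_py (detail : List (String × List (String × String))) (out : Option (List (String × String))) : Prop := out = get_contract_py_alt detail
instance (detail : List (String × List (String × String))) (out : Option (List (String × String))) : Decidable (Spec_get_contract_py detail out) := by unfold Spec_get_contract_py; infer_instance

-- ===== CLAIM (what is proved, stated in full; the proofs are below) =====
def Claim_equal_get_contract_py : Prop := ∀ (detail : List (String × List (String × String))), Dom_get_contract_py detail → Spec_get_contract_py detail (get_contract_py detail)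

-- ===== LEMMAS AND PROOFS =====
-- first truthy address in the list
def firstAny : List (String × String) → Option String
  | [] => none
  | (_, address) :: rest => if address ≠ "" then some address else firstAny rest

theorem fold_fst (l : List (String × String)) :
    ∀ fk fa, (l.foldl bStep (fk, fa)).1 = (match fk with | some r => some r | none => aLoop1 l) := by
  induction l with
  | nil => intro fk fa; cases fk <;> simp [List.foldl, aLoop1]
  | cons hd tl ih =>
    intro fk fa
    obtain ⟨p, a⟩ := hd
    simp only [List.foldl, bStep]
    by_cases ha : a = ""
    · cases fk <;> simp [ha, ih, aLoop1]
    · cases fk with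
      | none =>
        simp only [ha, if_pos, Option.isNone_none]
        cases h : PySem.Dict.get? chainIds p <;> simp [ha, h, ih, aLoop1]
      | some r => simp [ha, ih, aLoop1]

theorem fold_snd (l : List (String × String)) :
    ∀ fk fa, (l.foldl bStep (fk, fa)).2 = (match fa with | some a => some a | none => firstAny l) := by
  induction l with
  | nil => intro fk fa; cases fa <;> simp [List.foldl, firstAny]
  | cons hd tl ih =>
    intro fk fa
    obtain ⟨p, a⟩ := hd
    simp only [List.foldl, bStep]
    by_cases ha : a = ""
    · cases fa <;> simp [ha, ih, firstAny]
    · cases fa with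
      | none =>
        by_cases hk : (if (fk).isNone = true then
            match PySem.Dict.get? chainIds p with
            | some cid => some [("address", a), ("chain_id", cid)]
            | none => fk
          else fk).isNone <;> simp [ha, ih, firstAny]
      | some x => simp [ha, ih, firstAny]

theorem aLoop2_eq (l : List (String × String)) :
    aLoop2 l = (match firstAny l with
      | some a => some [("address", a), ("chain_id", "1")]
      | none => none) := by
  induction l with
  | nil => simp [aLoop2, firstAny]
  | cons hd tl ih =>
    obtain ⟨p, a⟩ := hd
    by_cases ha : a = "" <;> simp [aLoop2, firstAny, ha, ih]

-- ===== VERDICT (by name: the statement is the Claim_ definition above) =====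
theorem get_contract_py_spec : Claim_equal_get_contract_py := by
  intro detail _
  unfold Spec_get_contract_py get_contract_py get_contract_py_alt
  set platforms := PySem.Dict.getD (PySem.Dict.mk detail) "platforms" [] with hp
  simp only [fold_fst, fold_snd, aLoop2_eq]
  cases h1 : aLoop1 platforms <;> cases h2 : firstAny platforms <;> simp
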